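-- pv_equiv track=rewrite | github.com/koreyou/mtool | score/mces.py | domination_conflict
-- ===== SOURCE A (Python) =====
-- def domination_conflict(cv, i, j, dominated1, dominated2):
--     if not dominated1 or not dominated2 or i < 0 or j < 0:
--         return False
--     dominated_i = dominated1[i]
--     dominated_j = dominated2[j]
--     for _i, _j in cv.items():
--         if _i >= 0 and _j >= 0 and \
--                 _i in dominated_i and \
--                 _j not in dominated_j:
--             return True
--     return False
-- ===== SOURCE B (Python) =====
-- def domination_conflict(cv, i, j, dominated1, dominated2):
--     if not dominated1 or not dominated2 or i < 0 or j < 0: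
--         return False
--     dominated_i = dominated1[i]
--     dominated_j = dominated2[j]
--     for x in dominated_i:
--         if x >= 0 and x in cv:
--             _j = cv[x]
--             if _j >= 0 and _j not in dominated_j:
--                 return True
--     return False
-- ===== Notes on version B (the rewrite author's own statement) =====
-- stated objective: alternative
-- what changed: B drives the search off the elements of dominated1[i] with a dict lookup into cv, instead of A's full scan over cv.items() with a membership test into dominated1[i].
import Mathlib
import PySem

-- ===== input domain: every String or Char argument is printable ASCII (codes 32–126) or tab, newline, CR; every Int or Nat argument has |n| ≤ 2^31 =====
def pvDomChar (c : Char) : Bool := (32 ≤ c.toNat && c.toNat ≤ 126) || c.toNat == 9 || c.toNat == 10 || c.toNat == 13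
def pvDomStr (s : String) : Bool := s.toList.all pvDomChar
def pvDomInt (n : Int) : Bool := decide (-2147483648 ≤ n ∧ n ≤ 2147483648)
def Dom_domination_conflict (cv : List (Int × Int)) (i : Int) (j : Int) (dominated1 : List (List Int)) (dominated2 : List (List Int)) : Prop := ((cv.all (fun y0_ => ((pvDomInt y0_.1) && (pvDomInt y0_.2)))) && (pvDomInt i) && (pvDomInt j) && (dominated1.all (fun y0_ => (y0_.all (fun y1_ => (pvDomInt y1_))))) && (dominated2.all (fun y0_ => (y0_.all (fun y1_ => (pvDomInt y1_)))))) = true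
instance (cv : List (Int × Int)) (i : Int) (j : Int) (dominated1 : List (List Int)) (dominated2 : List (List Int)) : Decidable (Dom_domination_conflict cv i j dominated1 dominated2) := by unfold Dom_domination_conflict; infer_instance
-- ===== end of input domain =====

-- B iterates over the elements of dominated1[i] with a first-match lookup into cv,
-- instead of A's full scan over cv.items(); alternative decomposition, same cost class.


-- ===== PORT A =====
-- the 'for _i, _j in cv.items()' loop with its early return
def dcLoopA (cv : List (Int × Int)) (di dj : List Int) : Bool :=
  match cv with
  | [] => false
  | (k, v) :: rest =>
    if decide (0 ≤ k) && decide (0 ≤ v) && di.contains k && !dj.contains v then true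
    else dcLoopA rest di dj

def domination_conflict (cv : List (Int × Int)) (i : Int) (j : Int) (dominated1 : List (List Int)) (dominated2 : List (List Int)) : Bool :=
  if dominated1.isEmpty || dominated2.isEmpty || decide (i < 0) || decide (j < 0) then false
  else
    -- dominated1[i] / dominated2[j]: IndexError (= none) excluded by Pre_
    match PySem.List.pyGet? dominated1 i with
    | none => false
    | some di =>
      match PySem.List.pyGet? dominated2 j with
      | none => false
      | some dj => dcLoopA cv di dj

-- ===== PORT B =====
-- 'x in cv' + 'cv[x]' on a dict: first-match lookup in the association list
def dcLookup (cv : List (Int × Int)) (x : Int) : Option Int :=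
  match cv with
  | [] => none
  | (k, v) :: rest => if k = x then some v else dcLookup rest x

-- the 'for x in dominated_i' loop with its early return
def dcLoopB (cv : List (Int × Int)) (di dj : List Int) : Bool :=
  match di with
  | [] => false
  | x :: rest =>
    if decide (0 ≤ x) then
      match dcLookup cv x with
      | some v => if decide (0 ≤ v) && !dj.contains v then true else dcLoopB cv rest dj
      | none => dcLoopB cv rest dj
    else dcLoopB cv rest dj

def domination_conflict_alt (cv : List (Int × Int)) (i : Int) (j : Int) (dominated1 : List (List Int)) (dominated2 : List (List Int)) : Bool :=
  if dominated1.isEmpty || dominated2.isEmpty || decide (i < 0) || decide (j < 0) then false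
  else
    -- dominated1[i] / dominated2[j]: IndexError (= none) excluded by Pre_
    match PySem.List.pyGet? dominated2 j with
    | none => false
    | some dj =>
      match PySem.List.pyGet? dominated1 i with
      | none => false
      | some di => dcLoopB cv di dj

-- ===== PRECONDITION & SPEC =====
-- Pre_ excludes (a) inputs where Python A raises IndexError (both lists nonempty, 0 ≤ i, 0 ≤ j,
-- but i or j out of range), and (b) Lean-level lists cv with duplicate keys, which correspond to
-- no Python dict (cv is a dict in Python, so its keys are necessarily distinct).
def Pre_domination_conflict (cv : List (Int × Int)) (i : Int) (j : Int) (dominated1 : List (List Int)) (dominated2 : List (List Int)) : Prop :=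
  (cv.map Prod.fst).Nodup ∧
  ((dominated1 ≠ [] ∧ dominated2 ≠ [] ∧ 0 ≤ i ∧ 0 ≤ j) →
    (i < dominated1.length ∧ j < dominated2.length))
instance (cv : List (Int × Int)) (i : Int) (j : Int) (dominated1 : List (List Int)) (dominated2 : List (List Int)) : Decidable (Pre_domination_conflict cv i j dominated1 dominated2) := by unfold Pre_domination_conflict; infer_instance

def pvWitness_domination_conflict : (List (Int × Int)) × Int × Int × List (List Int) × List (List Int) := ([(0, 1)], 0, 0, [[0]], [[2]])

def Spec_domination_conflict (cv : List (Int × Int)) (i : Int) (j : Int) (dominated1 : List (List Int)) (dominated2 : List (List Int)) (out : Bool) : Prop := out = domination_conflict_alt cv i j dominated1 dominated2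
instance (cv : List (Int × Int)) (i : Int) (j : Int) (dominated1 : List (List Int)) (dominated2 : List (List Int)) (out : Bool) : Decidable (Spec_domination_conflict cv i j dominated1 dominated2 out) := by unfold Spec_domination_conflict; infer_instance

-- ===== CLAIM (what is proved, stated in full; the proofs are below) =====
def Claim_equal_domination_conflict : Prop := ∀ (cv : List (Int × Int)) (i : Int) (j : Int) (dominated1 : List (List Int)) (dominated2 : List (List Int)), Dom_domination_conflict cv i j dominated1 dominated2 → Pre_domination_conflict cv i j dominated1 dominated2 → Spec_domination_conflict cv i j dominated1 dominated2 (domination_conflict cv i j dominated1 dominated2)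

-- ===== LEMMAS AND PROOFS =====

theorem dcLoopA_iff (cv : List (Int × Int)) (di dj : List Int) :
    dcLoopA cv di dj = true ↔
      ∃ k v, (k, v) ∈ cv ∧ 0 ≤ k ∧ 0 ≤ v ∧ k ∈ di ∧ v ∉ dj := by
  induction cv with
  | nil => simp [dcLoopA]
  | cons p rest ih =>
    obtain ⟨k, v⟩ := p
    simp only [dcLoopA]
    split_ifs with h
    · simp only [Bool.and_eq_true, decide_eq_true_eq, Bool.not_eq_true',
        List.contains_eq_mem, decide_eq_false_iff_not, List.mem_cons] at h ⊢
      constructor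
      · intro _
        exact ⟨k, v, Or.inl rfl, h.1.1.1, h.1.1.2, by simpa using h.1.2, by simpa using h.2⟩
      · intro _; trivial
    · simp only [Bool.and_eq_true, decide_eq_true_eq, Bool.not_eq_true',
        List.contains_eq_mem, decide_eq_false_iff_not] at h
      rw [ih]
      constructor
      · rintro ⟨k', v', hm, h1, h2, h3, h4⟩
        exact ⟨k', v', List.mem_cons_of_mem _ hm, h1, h2, h3, h4⟩
      · rintro ⟨k', v', hm, h1, h2, h3, h4⟩
        rcases List.mem_cons.mp hm with he | hm'
        · injection he with e1 e2; subst e1; subst e2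
          exact absurd ⟨⟨⟨h1, h2⟩, by simpa using h3⟩, by simpa using h4⟩ h
        · exact ⟨k', v', hm', h1, h2, h3, h4⟩

theorem dcLoopB_iff (cv : List (Int × Int)) (di dj : List Int) :
    dcLoopB cv di dj = true ↔
      ∃ x ∈ di, 0 ≤ x ∧ ∃ v, dcLookup cv x = some v ∧ 0 ≤ v ∧ v ∉ dj := by
  induction di with
  | nil => simp [dcLoopB]
  | cons x rest ih =>
    simp only [dcLoopB]
    split_ifs with hx
    · simp only [decide_eq_true_eq] at hx
      cases hl : dcLookup cv x with
      | none =>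
        rw [ih]
        constructor
        · rintro ⟨y, hy, h⟩; exact ⟨y, List.mem_cons_of_mem _ hy, h⟩
        · rintro ⟨y, hy, h0, v, hv, hrest⟩
          rcases List.mem_cons.mp hy with rfl | hy'
          · rw [hl] at hv; exact absurd hv (by simp)
          · exact ⟨y, hy', h0, v, hv, hrest⟩
      | some v =>
        show (if (decide (0 ≤ v) && !dj.contains v) = true then true else dcLoopB cv rest dj) = true ↔ _
        split_ifs with hv
        · simp only [Bool.and_eq_true, decide_eq_true_eq, Bool.not_eq_true',
            List.contains_eq_mem, decide_eq_false_iff_not] at hv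
          constructor
          · intro _; exact ⟨x, List.mem_cons_self .., hx, v, hl, hv.1, hv.2⟩
          · intro _; rfl
        · simp only [Bool.and_eq_true, decide_eq_true_eq, Bool.not_eq_true',
            List.contains_eq_mem, decide_eq_false_iff_not] at hv
          rw [ih]
          constructor
          · rintro ⟨y, hy, h⟩; exact ⟨y, List.mem_cons_of_mem _ hy, h⟩
          · rintro ⟨y, hy, h0, v', hv', hrest⟩
            rcases List.mem_cons.mp hy with rfl | hy'
            · rw [hl] at hv'; injection hv' with e; subst e
              exact absurd ⟨hrest.1, hrest.2⟩ hv
            · exact ⟨y, hy', h0, v', hv', hrest⟩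
    · simp only [decide_eq_true_eq] at hx
      rw [ih]
      constructor
      · rintro ⟨y, hy, h⟩; exact ⟨y, List.mem_cons_of_mem _ hy, h⟩
      · rintro ⟨y, hy, h0, h⟩
        rcases List.mem_cons.mp hy with rfl | hy'
        · exact absurd h0 hx
        · exact ⟨y, hy', h0, h⟩

theorem dcLookup_mem {cv : List (Int × Int)} {x v : Int} (h : dcLookup cv x = some v) :
    (x, v) ∈ cv := by
  induction cv with
  | nil => simp [dcLookup] at h
  | cons p rest ih =>
    obtain ⟨k, w⟩ := p
    simp only [dcLookup] at h
    split_ifs at h with he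
    · injection h with e; subst he; subst e; exact List.mem_cons_self ..
    · exact List.mem_cons_of_mem _ (ih h)

theorem mem_dcLookup {cv : List (Int × Int)} {x v : Int}
    (hnd : (cv.map Prod.fst).Nodup) (h : (x, v) ∈ cv) : dcLookup cv x = some v := by
  induction cv with
  | nil => simp at h
  | cons p rest ih =>
    obtain ⟨k, w⟩ := p
    simp only [List.map_cons, List.nodup_cons] at hnd
    rcases List.mem_cons.mp h with he | hm
    · injection he with e1 e2; subst e1; subst e2
      simp [dcLookup]
    · simp only [dcLookup]
      split_ifs with he
      · exact absurd (List.mem_map.mpr ⟨(x, v), hm, he.symm⟩) hnd.1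
      · exact ih hnd.2 hm

theorem loops_eq (cv : List (Int × Int)) (di dj : List Int)
    (hnd : (cv.map Prod.fst).Nodup) : dcLoopA cv di dj = dcLoopB cv di dj := by
  have h : dcLoopA cv di dj = true ↔ dcLoopB cv di dj = true := by
    rw [dcLoopA_iff, dcLoopB_iff]
    constructor
    · rintro ⟨k, v, hm, h1, h2, h3, h4⟩
      exact ⟨k, h3, h1, v, mem_dcLookup hnd hm, h2, h4⟩
    · rintro ⟨x, hx, h0, v, hv, h2, h4⟩
      exact ⟨x, v, dcLookup_mem hv, h0, h2, hx, h4⟩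
  cases ha : dcLoopA cv di dj <;> cases hb : dcLoopB cv di dj <;>
    simp_all

-- ===== VERDICT (by name: the statement is the Claim_ definition above) =====
theorem domination_conflict_spec : Claim_equal_domination_conflict := by
  intro cv i j d1 d2 _hdom hpre
  unfold Spec_domination_conflict domination_conflict domination_conflict_alt
  split_ifs with hg
  · rfl
  · cases h1 : PySem.List.pyGet? d1 i <;> cases h2 : PySem.List.pyGet? d2 j <;>
      simp only []
    exact loops_eq cv _ _ hpre.1
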